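-- pv_equiv track=rewrite | github.com/changhaonan/RPLBenchTools | lgmcts/urdf_deep_fixer.py | remove_material_from_obj
-- ===== SOURCE A (Python) =====
-- def remove_material_from_obj(obj_content: str, materials_to_remove: list) -> str:
--     result = []
--     skip_material = False
--
--     for line in obj_content.splitlines():
--         line = line.strip()
--         if line.startswith("usemtl"):
--             current_material = line.split()[1]
--             if current_material in materials_to_remove:
--                 skip_material = True
--             else:
--                 skip_material = False
--         if not skip_material:
--             result.append(line)
--
--     return "\n".join(result)
-- ===== SOURCE B (Python) =====
-- def remove_material_from_obj(obj_content: str, materials_to_remove: list) -> str: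
--     lines = [ln.strip() for ln in obj_content.splitlines()]
--     n = len(lines)
--     # block decomposition: preamble block (no material), then one block per usemtl line
--     i = 0
--     preamble = []
--     while i < n and not lines[i].startswith("usemtl"):
--         preamble.append(lines[i])
--         i += 1
--     blocks = [(None, preamble)]
--     while i < n:
--         head = lines[i]
--         mat = head.split()[1]
--         body = [head]
--         i += 1
--         while i < n and not lines[i].startswith("usemtl"):
--             body.append(lines[i])
--             i += 1
--         blocks.append((mat, body))
--     kept = []
--     for mat, body in blocks:
--         if mat is None or mat not in materials_to_remove:
--             kept.extend(body)
--     return "\n".join(kept)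
-- ===== Notes on version B (the rewrite author's own statement) =====
-- stated objective: alternative
-- what changed: A streams over lines with a mutable skip flag; B first partitions the stripped lines into a preamble block plus one block per 'usemtl' line, then filters whole blocks by their material and joins the survivors.
import Mathlib
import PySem

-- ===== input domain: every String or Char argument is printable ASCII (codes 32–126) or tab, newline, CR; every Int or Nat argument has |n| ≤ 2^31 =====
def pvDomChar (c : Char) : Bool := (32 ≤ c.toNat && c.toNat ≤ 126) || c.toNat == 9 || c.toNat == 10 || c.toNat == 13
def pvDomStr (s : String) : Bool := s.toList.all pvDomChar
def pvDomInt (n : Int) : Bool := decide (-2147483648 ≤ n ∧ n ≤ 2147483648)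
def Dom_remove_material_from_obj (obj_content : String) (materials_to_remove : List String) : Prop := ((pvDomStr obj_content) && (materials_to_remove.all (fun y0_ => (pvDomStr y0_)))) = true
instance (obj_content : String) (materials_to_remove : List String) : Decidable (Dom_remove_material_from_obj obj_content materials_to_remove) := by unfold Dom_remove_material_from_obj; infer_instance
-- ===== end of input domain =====

-- B rewrites A's streaming skip-flag filter as a two-pass block decomposition
-- (preamble block + one block per 'usemtl' line, then filter whole blocks); objective: alternative decomposition, same cost.

-- ===== PORT A =====
-- A's loop body (strip, update skip flag on usemtl, append if not skipping), as in the Python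
def pvStepA (mats : List String) (st : List String × Bool) (rawline : String) : List String × Bool :=
  let line := PySem.Str.strip rawline
  let st :=
    if PySem.Str.startswith line "usemtl" then
      -- line.split()[1]; Pre_ guarantees the index exists (Python raises IndexError otherwise)
      let current_material := (PySem.Str.split₀ line).getD 1 ""
      (st.1, mats.contains current_material)
    else st
  if st.2 then st else (st.1 ++ [line], st.2)

def remove_material_from_obj (obj_content : String) (materials_to_remove : List String) : String :=
  let st := (PySem.Str.splitlines obj_content).foldl (pvStepA materials_to_remove) ([], false)
  PySem.Str.join "\n" st.1

-- ===== PORT B =====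
def pvNotU (l : String) : Bool := !(PySem.Str.startswith l "usemtl")

-- Source B's block-keeping test: preamble (no material) always kept, else 'mat not in materials_to_remove'
def pvKeepB (mats : List String) : Option String → Bool
  | none => true
  | some m => !(mats.contains m)

-- Source B's middle while loop: one block per usemtl head line (head plus following non-usemtl lines)
def pvBlocksFrom : List String → List (String × List String)
  | [] => []
  | line :: rest =>
      ((PySem.Str.split₀ line).getD 1 "", line :: rest.takeWhile pvNotU)
        :: pvBlocksFrom (rest.dropWhile pvNotU)
  termination_by l => l.length
  decreasing_by
    simp only [List.length_cons]
    exact Nat.lt_succ_of_le (List.length_dropWhile_le _ _)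

def remove_material_from_obj_alt (obj_content : String) (materials_to_remove : List String) : String :=
  let lines := (PySem.Str.splitlines obj_content).map PySem.Str.strip
  let preamble := lines.takeWhile pvNotU
  let blocks : List (Option String × List String) :=
    (none, preamble) :: (pvBlocksFrom (lines.dropWhile pvNotU)).map (fun b => (some b.1, b.2))
  let kept := blocks.foldl
    (fun acc b => if pvKeepB materials_to_remove b.1 then acc ++ b.2 else acc) []
  PySem.Str.join "\n" kept

-- ===== PRECONDITION & SPEC =====
-- Pre_ excludes exactly the inputs where some stripped line starts with "usemtl" but has no second
-- whitespace-separated token: there Python A (and B) raise IndexError on line.split()[1].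
def Pre_remove_material_from_obj (obj_content : String) (materials_to_remove : List String) : Prop :=
  ∀ line ∈ (PySem.Str.splitlines obj_content).map PySem.Str.strip,
    PySem.Str.startswith line "usemtl" = true → 2 ≤ (PySem.Str.split₀ line).length
instance (obj_content : String) (materials_to_remove : List String) : Decidable (Pre_remove_material_from_obj obj_content materials_to_remove) := by unfold Pre_remove_material_from_obj; infer_instance

def pvWitness_remove_material_from_obj : String × List String :=
  ("# head\nv 1 2 3\nusemtl red\nf 1 2 3\nusemtl blue\nf 2 3 4", ["red"])

def Spec_remove_material_from_obj (obj_content : String) (materials_to_remove : List String) (out : String) : Prop := out = remove_material_from_obj_alt obj_content materials_to_remove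
instance (obj_content : String) (materials_to_remove : List String) (out : String) : Decidable (Spec_remove_material_from_obj obj_content materials_to_remove out) := by unfold Spec_remove_material_from_obj; infer_instance

-- ===== CLAIM (what is proved, stated in full; the proofs are below) =====
def Claim_equal_remove_material_from_obj : Prop := ∀ (obj_content : String) (materials_to_remove : List String), Dom_remove_material_from_obj obj_content materials_to_remove → Pre_remove_material_from_obj obj_content materials_to_remove → Spec_remove_material_from_obj obj_content materials_to_remove (remove_material_from_obj obj_content materials_to_remove)

-- ===== LEMMAS AND PROOFS =====

-- A's loop, on already-stripped lines, as a structural recursion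
def procA (mats : List String) : Bool → List String → List String
  | _, [] => []
  | skip, line :: rest =>
    if PySem.Str.startswith line "usemtl" then
      let sk := mats.contains ((PySem.Str.split₀ line).getD 1 "")
      (if sk then [] else [line]) ++ procA mats sk rest
    else
      (if skip then [] else [line]) ++ procA mats skip rest

-- the surviving lines of a block list
def keptOf (mats : List String) (blocks : List (String × List String)) : List String :=
  blocks.flatMap (fun b => if pvKeepB mats (some b.1) then b.2 else [])

theorem foldA_eq (mats : List String) (raws : List String) (acc : List String) (skip : Bool) :
    (raws.foldl (pvStepA mats) (acc, skip)).1
      = acc ++ procA mats skip (raws.map PySem.Str.strip) := by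
  induction raws generalizing acc skip with
  | nil => simp [procA]
  | cons r rest ih =>
    rw [List.foldl_cons, ← Prod.mk.eta (p := pvStepA mats (acc, skip) r), ih, List.map_cons]
    by_cases h : PySem.Chars.startswith (PySem.Chars.strip r.toList) ['u','s','e','m','t','l']
    · by_cases hsk : ((PySem.Str.split₀ (PySem.Str.strip r))[1]?.getD "" ∈ mats)
      · simp [pvStepA, procA, h, hsk]
      · simp [pvStepA, procA, h, hsk]
    · cases skip with
      | false => simp [pvStepA, procA, h]
      | true => simp [pvStepA, procA, h]

theorem procA_eq (mats : List String) (lines : List String) (skip : Bool) :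
    procA mats skip lines =
      (if skip then [] else lines.takeWhile pvNotU)
        ++ keptOf mats (pvBlocksFrom (lines.dropWhile pvNotU)) := by
  match lines with
  | [] => simp [procA, keptOf, pvBlocksFrom]
  | line :: rest =>
    by_cases h : PySem.Chars.startswith line.toList ['u','s','e','m','t','l']
    · have hn : pvNotU line = false := by simp [pvNotU, h]
      have hb : pvBlocksFrom (line :: rest)
          = ((PySem.Str.split₀ line).getD 1 "", line :: rest.takeWhile pvNotU)
              :: pvBlocksFrom (rest.dropWhile pvNotU) := by
        rw [pvBlocksFrom]
      rw [procA, List.takeWhile_cons, List.dropWhile_cons]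
      simp only [hn, Bool.false_eq_true, if_false]
      rw [hb, procA_eq mats rest (mats.contains ((PySem.Str.split₀ line).getD 1 ""))]
      by_cases hsk : (((PySem.Str.split₀ line)[1]?.getD "") ∈ mats)
      · simp [h, hsk, keptOf, pvKeepB]
      · simp [h, hsk, keptOf, pvKeepB]
    · have hn : pvNotU line = true := by simp [pvNotU, h]
      rw [procA, List.takeWhile_cons, List.dropWhile_cons]
      simp only [hn, if_true]
      rw [procA_eq mats rest skip]
      cases skip with
      | false => simp [h]
      | true => simp [h]
  termination_by lines.length
  decreasing_by
    all_goals simp only [List.length_cons]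
    all_goals first
      | exact Nat.lt_succ_of_le (List.length_dropWhile_le _ _)
      | exact Nat.lt_succ_self _

theorem foldB_eq (mats : List String) (blocks : List (Option String × List String)) (acc : List String) :
    blocks.foldl
      (fun acc b => if pvKeepB mats b.1 then acc ++ b.2 else acc) acc
      = acc ++ blocks.flatMap (fun b => if pvKeepB mats b.1 then b.2 else []) := by
  induction blocks generalizing acc with
  | nil => simp
  | cons b rest ih =>
    rw [List.foldl_cons, List.flatMap_cons]
    by_cases hk : pvKeepB mats b.1
    · simp [hk, ih]
    · simp [hk, ih]

-- ===== VERDICT (by name: the statement is the Claim_ definition above) =====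
theorem remove_material_from_obj_spec : Claim_equal_remove_material_from_obj := by
  intro obj mats _ _
  show remove_material_from_obj obj mats = remove_material_from_obj_alt obj mats
  simp only [remove_material_from_obj, remove_material_from_obj_alt, foldA_eq, foldB_eq, procA_eq]
  simp [keptOf, List.flatMap_map, pvKeepB]
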